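-- pv_equiv track=rewrite | github.com/VIDA-NYU/reprozip | reprounzip-qt/reprounzip_qt/reprounzip_interface.py | win_escape
-- ===== SOURCE A (Python) =====
-- safe_win_chars = set("ABCDEFGHIJKLMNOPQRSTUVWXYZ"
--                      "abcdefghijklmnopqrstuvwxyz"
--                      "0123456789"
--                      "-+=/:.,_\\$")
--
-- def win_escape(s):
--     r"""Given bl"a, returns "bl^"a".
--     """
--     if isinstance(s, bytes):
--         s = s.decode('utf-8')
--     if any(c not in safe_win_chars for c in s):
--         return '"%s"' % (s.replace('^', '^^')
--                           .replace('"', '^"')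
--                           .replace('%', '^%'))
--     else:
--         return s
-- ===== SOURCE B (Python) =====
-- safe_win_chars = set("ABCDEFGHIJKLMNOPQRSTUVWXYZ"
--                      "abcdefghijklmnopqrstuvwxyz"
--                      "0123456789"
--                      "-+=/:.,_\\$")
--
-- win_esc_map = {'^': '^^', '"': '^"', '%': '^%'}
--
-- def win_escape(s):
--     if isinstance(s, bytes):
--         s = s.decode('utf-8')
--     buf = ''
--     unsafe = False
--     for c in s:
--         buf += win_esc_map.get(c, c)
--         if c not in safe_win_chars:
--             unsafe = True
--     if unsafe:
--         return '"%s"' % buf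
--     return s
-- ===== Notes on version B (the rewrite author's own statement) =====
-- stated objective: alternative
-- what changed: Replaces the membership any()-scan plus three chained .replace passes with a single fold over the string that both builds the escaped buffer from a per-character escape map and tracks the unsafe flag.
import Mathlib
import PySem

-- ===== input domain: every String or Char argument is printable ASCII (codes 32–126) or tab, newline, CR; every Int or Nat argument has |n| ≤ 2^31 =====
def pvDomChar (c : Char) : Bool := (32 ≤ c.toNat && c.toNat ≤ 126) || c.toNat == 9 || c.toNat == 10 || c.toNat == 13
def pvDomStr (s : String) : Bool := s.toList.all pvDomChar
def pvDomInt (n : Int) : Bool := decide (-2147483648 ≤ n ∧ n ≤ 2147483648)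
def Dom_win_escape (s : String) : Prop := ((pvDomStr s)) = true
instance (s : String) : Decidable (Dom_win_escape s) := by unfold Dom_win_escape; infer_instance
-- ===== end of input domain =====

-- B collapses A's membership any()-scan plus three chained .replace passes into one fold
-- that builds the escaped buffer and the unsafe flag together (str input, so no bytes branch).

-- ===== PORT A =====
def pvSafeWin : PySem.Set Char :=
  PySem.Set.ofList ("ABCDEFGHIJKLMNOPQRSTUVWXYZabcdefghijklmnopqrstuvwxyz0123456789-+=/:.,_\\$".toList)

def win_escape (s : String) : String :=
  if s.toList.any (fun c => !(PySem.Set.contains pvSafeWin c)) then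
    String.ofList ('"' ::
      (PySem.Chars.replace
        (PySem.Chars.replace
          (PySem.Chars.replace s.toList ['^'] ['^', '^'])
          ['"'] ['^', '"'])
        ['%'] ['^', '%']) ++ ['"'])
  else s

-- ===== PORT B =====
def pvWinEscMap : PySem.Dict Char (List Char) :=
  PySem.Dict.ofList [('^', ['^', '^']), ('"', ['^', '"']), ('%', ['^', '%'])]

def win_escape_alt (s : String) : String :=
  let st := s.toList.foldl
    (fun (acc : List Char × Bool) c =>
      (acc.1 ++ PySem.Dict.getD pvWinEscMap c [c],
       acc.2 || !(PySem.Set.contains pvSafeWin c)))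
    ([], false)
  if st.2 then String.ofList ('"' :: st.1 ++ ['"']) else s

-- ===== PRECONDITION & SPEC =====
def Spec_win_escape (s : String) (out : String) : Prop := out = win_escape_alt s
instance (s : String) (out : String) : Decidable (Spec_win_escape s out) := by unfold Spec_win_escape; infer_instance

-- ===== CLAIM (what is proved, stated in full; the proofs are below) =====
def Claim_equal_win_escape : Prop := ∀ (s : String), Dom_win_escape s → Spec_win_escape s (win_escape s)

-- ===== LEMMAS AND PROOFS =====

-- str.replace with a single-character pattern is a per-character flatMap
theorem go_single (c : Char) (new : List Char) :
    ∀ (l : List Char) (fuel : Nat) (acc : List Char), l.length ≤ fuel →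
      PySem.Chars.replace.go [c] new fuel l acc =
        acc.reverse ++ l.flatMap (fun x => if x = c then new else [x]) := by
  intro l
  induction l with
  | nil =>
    intro fuel acc _
    cases fuel <;> rw [PySem.Chars.replace.go] <;> simp
  | cons x t ih =>
    intro fuel acc h
    cases fuel with
    | zero => simp at h
    | succ f =>
      rw [PySem.Chars.replace.go]
      have hf : t.length ≤ f := by simpa using h
      by_cases hx : x = c
      · subst hx
        simp [List.isPrefixOf, ih f (new.reverse ++ acc) hf]
      · have : List.isPrefixOf [c] (x :: t) = false := by
          simp [List.isPrefixOf, Ne.symm hx]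
        simp [this, ih f (x :: acc) hf, hx]

theorem replace_single (s : List Char) (c : Char) (new : List Char) :
    PySem.Chars.replace s [c] new = s.flatMap (fun x => if x = c then new else [x]) := by
  rw [PySem.Chars.replace]
  simp [go_single c new s s.length [] (le_refl _)]

-- the combined per-character escape
def pvComb (c : Char) : List Char :=
  if c = '^' then ['^', '^'] else if c = '"' then ['^', '"'] else if c = '%' then ['^', '%'] else [c]

theorem getD_escMap (c : Char) : PySem.Dict.getD pvWinEscMap c [c] = pvComb c := by
  have hmk : pvWinEscMap = PySem.Dict.mk [('^', ['^', '^']), ('"', ['^', '"']), ('%', ['^', '%'])] := by decide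
  rw [PySem.Dict.getD_eq_get?_getD, hmk]
  by_cases h1 : c = '^'
  · subst h1; decide
  by_cases h2 : c = '"'
  · subst h2; decide
  by_cases h3 : c = '%'
  · subst h3; decide
  have e1 : ('^' == c) = false := by simp [Ne.symm h1]
  have e2 : ('"' == c) = false := by simp [Ne.symm h2]
  have e3 : ('%' == c) = false := by simp [Ne.symm h3]
  simp only [PySem.Dict.get?_mk_cons, e1, e2, e3]
  simp [pvComb, h1, h2, h3, PySem.Dict.get?]

theorem comb_eq_chain (c : Char) :
    (if c = '^' then ['^', '^'] else [c]).flatMap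
        (fun x => (if x = '"' then ['^', '"'] else [x]).flatMap
          (fun y => if y = '%' then ['^', '%'] else [y])) = pvComb c := by
  by_cases h1 : c = '^'
  · subst h1; decide
  by_cases h2 : c = '"'
  · subst h2; decide
  by_cases h3 : c = '%'
  · subst h3; decide
  simp [pvComb, h1, h2, h3]

theorem foldl_pair (l : List Char) :
    ∀ (a0 : List Char) (b0 : Bool),
      l.foldl
        (fun (acc : List Char × Bool) c =>
          (acc.1 ++ PySem.Dict.getD pvWinEscMap c [c],
           acc.2 || !(PySem.Set.contains pvSafeWin c))) (a0, b0) =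
      (a0 ++ l.flatMap pvComb, b0 || l.any (fun c => !(PySem.Set.contains pvSafeWin c))) := by
  induction l with
  | nil => simp
  | cons x t ih =>
    intro a0 b0
    rw [List.foldl_cons, ih]
    simp [getD_escMap, Bool.or_assoc]

-- ===== VERDICT (by name: the statement is the Claim_ definition above) =====
theorem win_escape_spec : Claim_equal_win_escape := by
  intro s _
  unfold Spec_win_escape win_escape win_escape_alt
  rw [foldl_pair s.toList [] false]
  simp only [List.nil_append, Bool.false_or, replace_single, List.flatMap_assoc]
  by_cases h : s.toList.any (fun c => !(PySem.Set.contains pvSafeWin c))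
  · simp only [h, if_true]
    congr 3
    apply List.flatMap_congr
    intro c _
    exact comb_eq_chain c
  · rw [Bool.not_eq_true] at h
    rw [h]
    simp
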